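-- pv_equiv track=rewrite | github.com/xuefly09/Python | ps2pr6.py | num_diff
-- ===== SOURCE A (Python) =====
-- def num_diff(s1, s2):
--     if len(s1) == 0:
--         return 0
--     else:
--         res_number = num_diff(s1[1:], s2[1:])
--         if s1[0] != s2[0]:
--             res_number += 1
--         return res_number
-- ===== SOURCE B (Python) =====
-- def num_diff(s1, s2):
--     count = 0
--     for i in range(len(s1)):
--         if s1[i] != s2[i]:
--             count += 1
--     return count
-- ===== Notes on version B (the rewrite author's own statement) =====
-- stated objective: faster
-- what changed: Replaces the head/tail recursion (which slices both strings at every step, making A quadratic and recursion-depth-limited) with a single iterative counting loop over positions; s2 is still indexed by position so a shorter s2 raises IndexError exactly as A does.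
import Mathlib
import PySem

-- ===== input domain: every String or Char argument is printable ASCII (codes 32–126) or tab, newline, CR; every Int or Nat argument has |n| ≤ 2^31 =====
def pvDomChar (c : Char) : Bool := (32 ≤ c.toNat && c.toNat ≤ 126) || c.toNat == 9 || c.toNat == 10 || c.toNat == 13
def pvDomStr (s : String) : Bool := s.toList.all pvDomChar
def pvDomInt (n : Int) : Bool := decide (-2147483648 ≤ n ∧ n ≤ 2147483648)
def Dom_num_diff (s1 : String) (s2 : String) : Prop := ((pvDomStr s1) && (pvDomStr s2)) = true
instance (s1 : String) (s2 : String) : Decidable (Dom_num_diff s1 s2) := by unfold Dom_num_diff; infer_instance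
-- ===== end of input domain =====

-- B replaces A's slice-per-step head/tail recursion by one iterative counting loop over indices (faster: no per-step string slices; same values, same IndexError condition).

-- ===== PORT A =====
-- A's recursion over the two strings: empty s1 → 0; else recurse on the [1:] slices
-- (slice = drop 1) and add 1 when the heads differ.  s2[0] is PySem.List.pyGet? 0,
-- which is none (Python: IndexError) when s2 is empty — excluded by Pre_num_diff.
def numDiffGo : List Char → List Char → Int
  | [], _ => 0
  | c :: t1, l2 =>
    let res_number := numDiffGo t1 (l2.drop 1)
    if PySem.List.pyGet? l2 0 ≠ some c then res_number + 1 else res_number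

def num_diff (s1 : String) (s2 : String) : Int := numDiffGo s1.toList s2.toList

-- ===== PORT B =====
-- B: count = 0; for i in range(len(s1)): if s1[i] != s2[i]: count += 1
def num_diff_alt (s1 : String) (s2 : String) : Int :=
  (PySem.List.pyRange 0 (s1.toList.length : Int) 1).foldl
    (fun count i => if PySem.List.pyGet? s1.toList i ≠ PySem.List.pyGet? s2.toList i then count + 1 else count) 0

-- ===== PRECONDITION & SPEC =====
-- Pre_ excludes exactly the inputs where Python A raises IndexError (s2 shorter than s1).
def Pre_num_diff (s1 : String) (s2 : String) : Prop := s1.length ≤ s2.length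
instance (s1 : String) (s2 : String) : Decidable (Pre_num_diff s1 s2) := by unfold Pre_num_diff; infer_instance
def pvWitness_num_diff : String × String := ("abc", "abd")

def Spec_num_diff (s1 : String) (s2 : String) (out : Int) : Prop := out = num_diff_alt s1 s2
instance (s1 : String) (s2 : String) (out : Int) : Decidable (Spec_num_diff s1 s2 out) := by unfold Spec_num_diff; infer_instance

-- ===== CLAIM (what is proved, stated in full; the proofs are below) =====
def Claim_equal_num_diff : Prop := ∀ (s1 : String) (s2 : String), Dom_num_diff s1 s2 → Pre_num_diff s1 s2 → Spec_num_diff s1 s2 (num_diff s1 s2)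

-- ===== LEMMAS AND PROOFS =====

-- counting foldl with any start accumulator
theorem foldl_count_int {α : Type} (p : α → Bool) (xs : List α) (a : Int) :
    xs.foldl (fun c x => if p x then c + 1 else c) a = a + (xs.countP p : Int) := by
  induction xs generalizing a with
  | nil => simp
  | cons x t ih =>
    simp only [List.foldl_cons, List.countP_cons, ih]
    by_cases h : p x = true
    · simp [h]; ring
    · simp [h]

-- B's fold as a countP over List.range
theorem alt_as_countP (l1 l2 : List Char) :
    (PySem.List.pyRange 0 (l1.length : Int) 1).foldl
      (fun count i => if PySem.List.pyGet? l1 i ≠ PySem.List.pyGet? l2 i then count + 1 else count) 0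
    = ((List.range l1.length).countP (fun k => decide (l1[k]? ≠ l2[k]?)) : Int) := by
  rw [PySem.List.pyRange_one]
  simp only [zero_add, sub_zero, Int.toNat_natCast, List.foldl_map]
  have : ∀ (a : Int),
      (List.range l1.length).foldl
        (fun count (k : Nat) => if PySem.List.pyGet? l1 (k : Int) ≠ PySem.List.pyGet? l2 (k : Int) then count + 1 else count) a
      = a + ((List.range l1.length).countP (fun k => decide (l1[k]? ≠ l2[k]?)) : Int) := by
    intro a
    have := foldl_count_int (fun k : Nat => decide (l1[k]? ≠ l2[k]?)) (List.range l1.length) a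
    simpa [PySem.List.pyGet?_natCast] using this
  simpa using this 0

-- A's recursion equals the same countP (holds for all l2, even short ones)
theorem go_as_countP (l1 l2 : List Char) :
    numDiffGo l1 l2 = ((List.range l1.length).countP (fun k => decide (l1[k]? ≠ l2[k]?)) : Int) := by
  induction l1 generalizing l2 with
  | nil => simp [numDiffGo]
  | cons c t ih =>
    simp only [numDiffGo, List.length_cons, List.range_succ_eq_map, List.countP_cons, List.countP_map]
    have hdrop : ∀ k : Nat, l2[k + 1]? = (l2.drop 1)[k]? := by
      intro k
      rw [List.getElem?_drop]
      congr 1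
      omega
    have hcnt : (List.range t.length).countP
        ((fun k => decide ((c :: t)[k]? ≠ l2[k]?)) ∘ (· + 1))
        = (List.range t.length).countP (fun k => decide (t[k]? ≠ (l2.drop 1)[k]?)) := by
      apply List.countP_congr
      intro k _
      simp only [Function.comp_apply, List.getElem?_cons_succ, hdrop k]
    rw [hcnt]
    have hget0 : PySem.List.pyGet? l2 0 = l2[0]? := by
      cases l2 <;> simp [PySem.List.pyGet?, PySem.List.pyIdx?]
    rw [ih (l2.drop 1)]
    by_cases h : l2[0]? = some c
    · simp [hget0, h]
    · have h1 : PySem.List.pyGet? l2 0 ≠ some c := by rw [hget0]; exact h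
      have h2 : (c :: t)[0]? ≠ l2[0]? := by simpa using fun he => h he.symm
      rw [if_pos h1]
      simp
      exact fun he => h he.symm


-- ===== VERDICT (by name: the statement is the Claim_ definition above) =====
theorem num_diff_spec : Claim_equal_num_diff := by
  intro s1 s2 _ _
  unfold Spec_num_diff num_diff num_diff_alt
  rw [go_as_countP, alt_as_countP]
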